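-- pv_equiv track=rewrite | github.com/oxiliere/oxutils | src/oxutils/permissions/actions.py | expand_actions
-- ===== SOURCE A (Python) =====
-- ACTION_HIERARCHY = {
--     "r": set(),            # read
--     "w": {"r"},            # write ⇒ read
--     "u": {"r"},            # update ⇒ read
--     "d": {"r", "w"},       # delete ⇒ write ⇒ read
--     "a": {"r"},            # approve ⇒ read
-- }
--
-- def expand_actions(actions: list[str]) -> list[str]:
--     """
--     ['w']        -> ['w', 'r']
--     ['d']        -> ['d', 'w', 'r']
--     ['a', 'w']   -> ['a', 'w', 'r']
--     """
--     expanded = set(actions)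
--
--     stack = list(actions)
--     while stack:
--         action = stack.pop()
--         implied = ACTION_HIERARCHY.get(action, set())
--
--         for a in implied:
--             if a not in expanded:
--                 expanded.add(a)
--                 stack.append(a)
--
--     return sorted(expanded)
-- ===== SOURCE B (Python) =====
-- # B: one flat pass over the input using the (already transitively closed) hierarchy
-- # as a closure table -- no worklist, no visited-guard.
--
-- _CLOSURE = {
--     "r": set(),
--     "w": {"r"},
--     "u": {"r"},
--     "d": {"r", "w"},
--     "a": {"r"},
-- }
--
--
-- def expand_actions(actions: list[str]) -> list[str]:
--     expanded = set(actions)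
--     for a in actions:
--         expanded |= _CLOSURE.get(a, set())
--     return sorted(expanded)
-- ===== Notes on version B (the rewrite author's own statement) =====
-- stated objective: simpler
-- what changed: Replaced the DFS worklist (stack + while loop + visited guard) by a single flat pass that unions each input action's precomputed closure set (the hierarchy is already transitively closed) into set(actions), then sorts.
import Mathlib
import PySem

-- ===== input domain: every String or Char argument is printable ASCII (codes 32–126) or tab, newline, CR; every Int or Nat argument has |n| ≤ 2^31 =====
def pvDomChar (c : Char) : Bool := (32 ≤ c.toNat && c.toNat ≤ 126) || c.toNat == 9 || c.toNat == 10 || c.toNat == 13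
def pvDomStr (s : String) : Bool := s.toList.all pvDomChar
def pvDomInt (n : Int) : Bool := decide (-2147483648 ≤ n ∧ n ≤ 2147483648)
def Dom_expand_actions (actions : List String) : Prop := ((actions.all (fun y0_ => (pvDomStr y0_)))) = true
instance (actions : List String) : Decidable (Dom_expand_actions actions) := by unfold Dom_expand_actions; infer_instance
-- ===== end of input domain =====

-- B replaces A's DFS worklist (stack + while loop + visited guard) by one flat pass unioning
-- precomputed closure sets, then sorting; objective: simpler.


-- ===== PORT A =====
-- ACTION_HIERARCHY (a Python dict literal of set literals)
def pvActionHierarchy : PySem.Dict String (PySem.Set String) :=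
  PySem.Dict.ofList [("r", PySem.Set.ofList []), ("w", PySem.Set.ofList ["r"]),
    ("u", PySem.Set.ofList ["r"]), ("d", PySem.Set.ofList ["r", "w"]), ("a", PySem.Set.ofList ["r"])]

-- the loop body 'for a in implied: if a not in expanded: expanded.add(a); stack.append(a)'.
-- Iterating the Python set 'implied' is ported as a fold over the Set's element list; the
-- function's result (sorted(expanded)) cannot depend on that iteration order.
def pvStepA (st : PySem.Set String × List String) (a : String) : PySem.Set String × List String :=
  if PySem.Set.contains st.1 a then st else (PySem.Set.add st.1 a, st.2 ++ [a])

-- the 'while stack:' loop; the fuel argument is only a termination guard (the proofs below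
-- show stack.length + 2 iterations always suffice, and expand_actions passes length + 3).
def pvLoopA : Nat → PySem.Set String → List String → PySem.Set String
  | 0, expanded, _ => expanded
  | fuel + 1, expanded, stack =>
    match PySem.List.pop? stack with
    | none => expanded
    | some (action, stack') =>
      let st := (PySem.Dict.getD pvActionHierarchy action PySem.Set.empty).foldl pvStepA
        (expanded, stack')
      pvLoopA fuel st.1 st.2

def expand_actions (actions : List String) : List String :=
  PySem.List.sorted (pvLoopA (actions.length + 3) (PySem.Set.ofList actions) actions)
    (fun x => x) false

-- ===== PORT B =====
-- _CLOSURE (B's own table; the same pairs, since ACTION_HIERARCHY is already transitively closed)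
def pvClosure : PySem.Dict String (PySem.Set String) :=
  PySem.Dict.ofList [("r", PySem.Set.ofList []), ("w", PySem.Set.ofList ["r"]),
    ("u", PySem.Set.ofList ["r"]), ("d", PySem.Set.ofList ["r", "w"]), ("a", PySem.Set.ofList ["r"])]

def expand_actions_alt (actions : List String) : List String :=
  PySem.List.sorted
    (actions.foldl (fun e a => PySem.Set.union e (PySem.Dict.getD pvClosure a PySem.Set.empty))
      (PySem.Set.ofList actions))
    (fun x => x) false

-- ===== PRECONDITION & SPEC =====
def Spec_expand_actions (actions : List String) (out : List String) : Prop := out = expand_actions_alt actions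
instance (actions : List String) (out : List String) : Decidable (Spec_expand_actions actions out) := by unfold Spec_expand_actions; infer_instance

-- ===== CLAIM (what is proved, stated in full; the proofs are below) =====
def Claim_equal_expand_actions : Prop := ∀ (actions : List String), Dom_expand_actions actions → Spec_expand_actions actions (expand_actions actions)

-- ===== LEMMAS AND PROOFS =====

-- the hierarchy lookup, by cases on the key
theorem pvHier_getD (a : String) :
    PySem.Dict.getD pvActionHierarchy a PySem.Set.empty =
      (if a = "r" then [] else if a = "w" then ["r"] else if a = "u" then ["r"]
       else if a = "d" then ["r", "w"] else if a = "a" then ["r"] else []) := by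
  have h : pvActionHierarchy =
      PySem.Dict.mk [("r", []), ("w", ["r"]), ("u", ["r"]), ("d", ["r", "w"]), ("a", ["r"])] := by
    decide
  rw [h]
  simp only [PySem.Dict.getD, PySem.Dict.get?_mk_cons, beq_iff_eq]
  by_cases h1 : a = "r" <;> by_cases h2 : a = "w" <;> by_cases h3 : a = "u" <;>
    by_cases h4 : a = "d" <;> by_cases h5 : a = "a" <;>
    simp_all [PySem.Dict.get?, eq_comm]

theorem pvClosure_eq_hier : pvClosure = pvActionHierarchy := rfl

-- at most this many elements can still be pushed: only "r"/"w" ever enter the stack anew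
def pvM (e : PySem.Set String) : Nat :=
  (if "r" ∈ e then 0 else 1) + (if "w" ∈ e then 0 else 1)

-- each loop iteration decreases this potential by one
def pvPot (e : PySem.Set String) (s : List String) : Nat := s.length + pvM e

-- what one pass of the inner 'for a in implied' fold does
theorem pvFold_spec (L : List String) :
    ∀ (e : PySem.Set String) (s : List String), e.Nodup →
      (L.foldl pvStepA (e, s)).1.Nodup ∧
      (∀ x, x ∈ (L.foldl pvStepA (e, s)).1 ↔ x ∈ e ∨ x ∈ L) ∧
      (∀ x, x ∈ (L.foldl pvStepA (e, s)).2 → x ∈ s ∨ x ∈ L) ∧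
      (∀ x, x ∈ s → x ∈ (L.foldl pvStepA (e, s)).2) ∧
      ((∀ a ∈ L, a = "r" ∨ a = "w") →
        (L.foldl pvStepA (e, s)).2.length + pvM (L.foldl pvStepA (e, s)).1 ≤ s.length + pvM e) := by
  induction L with
  | nil =>
    intro e s hnd
    simp [hnd]
  | cons a L ih =>
    intro e s hnd
    simp only [List.foldl_cons]
    by_cases ha : a ∈ e
    · have hstep : pvStepA (e, s) a = (e, s) := by
        simp [pvStepA, ha]
      rw [hstep]
      obtain ⟨h1, h2, h3, h4, h5⟩ := ih e s hnd
      refine ⟨h1, fun x => ?_, fun x hx => ?_, h4, fun hL => ?_⟩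
      · rw [h2 x]
        simp only [List.mem_cons]
        constructor
        · rintro (h | h)
          · exact Or.inl h
          · exact Or.inr (Or.inr h)
        · rintro (h | h | h)
          · exact Or.inl h
          · exact Or.inl (h ▸ ha)
          · exact Or.inr h
      · rcases h3 x hx with h | h
        · exact Or.inl h
        · exact Or.inr (List.mem_cons_of_mem _ h)
      · have := h5 (fun b hb => hL b (List.mem_cons_of_mem _ hb))
        omega
    · have hstep : pvStepA (e, s) a = (e ++ [a], s ++ [a]) := by
        simp [pvStepA, ha]
      rw [hstep]
      have hnd' : (e ++ [a]).Nodup := by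
        have := PySem.Set.nodup_add e a hnd
        rwa [PySem.Set.add_of_not_mem ha] at this
      obtain ⟨h1, h2, h3, h4, h5⟩ := ih (e ++ [a]) (s ++ [a]) hnd'
      refine ⟨h1, fun x => ?_, fun x hx => ?_, fun x hx => h4 x (by simp [hx]), fun hL => ?_⟩
      · rw [h2 x]
        simp only [List.mem_append, List.mem_cons]
        tauto
      · rcases h3 x hx with h | h
        · rcases List.mem_append.1 h with h' | h'
          · exact Or.inl h'
          · exact Or.inr (List.mem_cons.2 (Or.inl (List.mem_singleton.1 h')))
        · exact Or.inr (List.mem_cons_of_mem _ h)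
      · have hle := h5 (fun b hb => hL b (List.mem_cons_of_mem _ hb))
        have hMa : pvM (e ++ [a]) + 1 = pvM e := by
          rcases hL a List.mem_cons_self with h | h <;> subst h <;>
            simp only [pvM, List.mem_append, List.mem_singleton] <;>
            split_ifs <;> simp_all
        have hlen : (s ++ [a]).length = s.length + 1 := by simp
        omega

-- one iteration of the while loop, given the induction hypothesis for the remaining fuel
theorem pvLoopA_step (fuel : Nat)
    (ih : ∀ (e : PySem.Set String) (s : List String), e.Nodup → pvPot e s ≤ fuel →
      (pvLoopA fuel e s).Nodup ∧
        ∀ x, x ∈ pvLoopA fuel e s ↔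
          x ∈ e ∨ ∃ a ∈ s, x ∈ PySem.Dict.getD pvActionHierarchy a PySem.Set.empty)
    (e : PySem.Set String) (s' : List String) (action : String) (L : List String)
    (hact : PySem.Dict.getD pvActionHierarchy action PySem.Set.empty = L)
    (hL2 : ∀ a ∈ L, a = "r" ∨ a = "w")
    (hclosed : ∀ a ∈ L, ∀ x ∈ PySem.Dict.getD pvActionHierarchy a PySem.Set.empty, x ∈ L)
    (hnd : e.Nodup)
    (hpot : pvPot e (s' ++ [action]) ≤ fuel + 1) :
    (pvLoopA fuel (L.foldl pvStepA (e, s')).1 (L.foldl pvStepA (e, s')).2).Nodup ∧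
      ∀ x, x ∈ pvLoopA fuel (L.foldl pvStepA (e, s')).1 (L.foldl pvStepA (e, s')).2 ↔
        x ∈ e ∨ ∃ a ∈ s' ++ [action], x ∈ PySem.Dict.getD pvActionHierarchy a PySem.Set.empty := by
  obtain ⟨hnd', hm1, hsub, hsup, hlen⟩ := pvFold_spec L e s' hnd
  have hpot' : pvPot (L.foldl pvStepA (e, s')).1 (L.foldl pvStepA (e, s')).2 ≤ fuel := by
    have := hlen hL2
    simp only [pvPot, List.length_append, List.length_singleton] at *
    omega
  obtain ⟨hndR, hmR⟩ := ih _ _ hnd' hpot'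
  refine ⟨hndR, fun x => ?_⟩
  rw [hmR x]
  constructor
  · rintro (hx | ⟨a, ha, hxa⟩)
    · rcases (hm1 x).1 hx with he | hL
      · exact Or.inl he
      · exact Or.inr ⟨action, by simp, by rw [hact]; exact hL⟩
    · rcases hsub a ha with h | h
      · exact Or.inr ⟨a, by simp [h], hxa⟩
      · exact Or.inr ⟨action, by simp, by rw [hact]; exact hclosed a h x hxa⟩
  · rintro (hx | ⟨a, ha, hxa⟩)
    · exact Or.inl ((hm1 x).2 (Or.inl hx))
    · rcases List.mem_append.1 ha with h | h
      · exact Or.inr ⟨a, hsup a h, hxa⟩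
      · have haction : a = action := List.mem_singleton.1 h
        subst haction
        exact Or.inl ((hm1 x).2 (Or.inr (by rw [hact] at hxa; exact hxa)))

-- the while loop computes expanded ∪ ⋃_{a ∈ stack} ACTION_HIERARCHY.get(a, ∅), without duplicates
theorem pvLoopA_spec (fuel : Nat) :
    ∀ (e : PySem.Set String) (s : List String), e.Nodup → pvPot e s ≤ fuel →
      (pvLoopA fuel e s).Nodup ∧
        ∀ x, x ∈ pvLoopA fuel e s ↔
          x ∈ e ∨ ∃ a ∈ s, x ∈ PySem.Dict.getD pvActionHierarchy a PySem.Set.empty := by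
  induction fuel with
  | zero =>
    intro e s hnd hpot
    have hs : s = [] := List.eq_nil_of_length_eq_zero (by simp only [pvPot] at hpot; omega)
    subst hs
    simp [pvLoopA, hnd]
  | succ fuel ih =>
    intro e s hnd hpot
    rcases List.eq_nil_or_concat s with hs | ⟨s', action, hs⟩
    · subst hs
      simp [pvLoopA, PySem.List.pop?, hnd]
    · subst hs
      simp only [List.concat_eq_append] at hpot ⊢
      have hpop : PySem.List.pop? (s' ++ [action]) = some (action, s') :=
        PySem.List.pop?_last s' action
      simp only [pvLoopA, hpop]
      rw [pvHier_getD action]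
      split_ifs with h1 h2 h3 h4 h5
      · exact pvLoopA_step fuel ih e s' action []
          (by rw [pvHier_getD action]; simp [h1]) (by decide) (by decide) hnd hpot
      · exact pvLoopA_step fuel ih e s' action ["r"]
          (by rw [pvHier_getD action]; simp [h2]) (by decide) (by decide) hnd hpot
      · exact pvLoopA_step fuel ih e s' action ["r"]
          (by rw [pvHier_getD action]; simp [h3]) (by decide) (by decide) hnd hpot
      · exact pvLoopA_step fuel ih e s' action ["r", "w"]
          (by rw [pvHier_getD action]; simp [h4]) (by decide) (by decide) hnd hpot
      · exact pvLoopA_step fuel ih e s' action ["r"]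
          (by rw [pvHier_getD action]; simp [h5]) (by decide) (by decide) hnd hpot
      · exact pvLoopA_step fuel ih e s' action []
          (by rw [pvHier_getD action]; simp [h1, h2, h3, h4, h5]) (by decide) (by decide) hnd hpot

-- B's flat union pass computes set(actions) ∪ ⋃_{a ∈ actions} _CLOSURE.get(a, ∅), without duplicates
theorem pvAltFold_spec (l : List String) :
    ∀ (e : PySem.Set String), e.Nodup →
      (l.foldl (fun e a => PySem.Set.union e (PySem.Dict.getD pvClosure a PySem.Set.empty)) e).Nodup ∧
      ∀ x, x ∈ l.foldl (fun e a => PySem.Set.union e (PySem.Dict.getD pvClosure a PySem.Set.empty)) e ↔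
        x ∈ e ∨ ∃ a ∈ l, x ∈ PySem.Dict.getD pvClosure a PySem.Set.empty := by
  induction l with
  | nil =>
    intro e hnd
    simp [hnd]
  | cons a l ih =>
    intro e hnd
    simp only [List.foldl_cons]
    obtain ⟨h1, h2⟩ := ih (PySem.Set.union e (PySem.Dict.getD pvClosure a PySem.Set.empty))
      (PySem.Set.nodup_union _ _ hnd)
    refine ⟨h1, fun x => ?_⟩
    rw [h2 x, PySem.Set.mem_union]
    simp only [List.mem_cons]
    constructor
    · rintro ((hx | hx) | ⟨b, hb, hxb⟩)
      · exact Or.inl hx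
      · exact Or.inr ⟨a, Or.inl rfl, hx⟩
      · exact Or.inr ⟨b, Or.inr hb, hxb⟩
    · rintro (hx | ⟨b, hb | hb, hxb⟩)
      · exact Or.inl (Or.inl hx)
      · exact Or.inl (Or.inr (hb ▸ hxb))
      · exact Or.inr ⟨b, hb, hxb⟩

-- ===== VERDICT (by name: the statement is the Claim_ definition above) =====
theorem expand_actions_spec : Claim_equal_expand_actions := by
  intro actions _
  unfold Spec_expand_actions expand_actions expand_actions_alt
  rw [PySem.List.sorted_id_eq_sorted_id_iff_perm]
  obtain ⟨hndA, hmemA⟩ := pvLoopA_spec (actions.length + 3) (PySem.Set.ofList actions) actions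
    (PySem.Set.nodup_ofList actions)
    (by simp only [pvPot, pvM]; split_ifs <;> omega)
  obtain ⟨hndB, hmemB⟩ := pvAltFold_spec actions (PySem.Set.ofList actions)
    (PySem.Set.nodup_ofList actions)
  rw [List.perm_ext_iff_of_nodup hndA hndB]
  intro x
  rw [hmemA x, hmemB x]
  simp only [pvClosure_eq_hier]
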